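-- pv_equiv track=rewrite | github.com/evenwebb/penrice-calendar-scraper | generate_ics.py | _escape_and_fold_ical_text
-- ===== SOURCE A (Python) =====
-- ICAL_LINE_LENGTH = 75
--
-- ICAL_NEWLINE = "\r\n"
--
-- def _escape_and_fold_ical_text(text: str, prefix: str = "") -> str:
--     """Escape and fold iCalendar text fields per RFC 5545."""
--     escaped = (
--         text.replace("\\", "\\\\")
--         .replace(";", r"\;")
--         .replace(",", r"\,")
--         .replace("\n", r"\n")
--     )
--     full_line = prefix + escaped
--     if len(full_line) <= ICAL_LINE_LENGTH:
--         return full_line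
--
--     result = [full_line[:ICAL_LINE_LENGTH]]
--     remaining = full_line[ICAL_LINE_LENGTH:]
--     while remaining:
--         result.append(" " + remaining[:ICAL_LINE_LENGTH - 1])
--         remaining = remaining[ICAL_LINE_LENGTH - 1:]
--     return ICAL_NEWLINE.join(result)
-- ===== SOURCE B (Python) =====
-- def _escape_and_fold_ical_text(text: str, prefix: str = "") -> str:
--     """Escape and fold iCalendar text fields per RFC 5545 (single-pass fold)."""
--     escaped = (
--         text.replace("\\", "\\\\")
--         .replace(";", r"\;")
--         .replace(",", r"\,")
--         .replace("\n", r"\n")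
--     )
--     full_line = prefix + escaped
--     out = []
--     count = 0
--     limit = 75
--     for c in full_line:
--         if count == limit:
--             out.append("\r\n ")
--             count = 0
--             limit = 74
--         out.append(c)
--         count += 1
--     return "".join(out)
-- ===== Notes on version B (the rewrite author's own statement) =====
-- stated objective: alternative
-- what changed: Replaces A's slice-and-remainder chunk loop (build 75/74-char pieces, then join with CRLF) by a single left-to-right pass over the characters that emits the fold sequence in place when a running per-line counter hits the 75/74 limit, avoiding repeated slice copies of the shrinking remainder.
import Mathlib
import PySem

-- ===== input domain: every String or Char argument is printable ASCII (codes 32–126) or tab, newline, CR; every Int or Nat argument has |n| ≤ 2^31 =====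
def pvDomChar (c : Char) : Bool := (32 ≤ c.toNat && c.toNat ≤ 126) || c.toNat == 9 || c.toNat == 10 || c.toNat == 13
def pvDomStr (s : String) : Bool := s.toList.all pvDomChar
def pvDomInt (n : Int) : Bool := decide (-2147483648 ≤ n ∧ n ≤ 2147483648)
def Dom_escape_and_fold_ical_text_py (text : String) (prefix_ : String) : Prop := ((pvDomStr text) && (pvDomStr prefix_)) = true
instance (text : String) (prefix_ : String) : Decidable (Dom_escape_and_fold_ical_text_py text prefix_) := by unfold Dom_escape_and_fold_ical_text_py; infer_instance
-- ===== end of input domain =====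

-- B replaces A's slice-and-remainder chunk-and-join fold by one left-to-right pass with a
-- running per-line counter (75 first line, 74 continuations); same escaping, same output.

-- ===== PORT A =====
-- while remaining: result.append(" " + remaining[:74]); remaining = remaining[74:]
def pvFoldLoopA (remaining : List Char) (result : List (List Char)) : List (List Char) :=
  if remaining = [] then result
  else pvFoldLoopA (remaining.drop 74) (result ++ [' ' :: remaining.take 74])
termination_by remaining.length
decreasing_by
  have : remaining.length ≠ 0 := by simpa [List.length_eq_zero_iff] using ‹¬ remaining = []›
  simp only [List.length_drop]; omega

def escape_and_fold_ical_text_py (text : String) (prefix_ : String) : String :=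
  let escaped := PySem.Str.replace (PySem.Str.replace (PySem.Str.replace
      (PySem.Str.replace text "\\" "\\\\") ";" "\\;") "," "\\,") "\n" "\\n"
  let full_line := prefix_.toList ++ escaped.toList
  if full_line.length ≤ 75 then String.ofList full_line
  else
    String.ofList (List.intercalate ['\r', '\n']
      (pvFoldLoopA (full_line.drop 75) [full_line.take 75]))

-- ===== PORT B =====
-- for c in full_line: if count == limit: out += "\r\n "; count,limit = 0,74; out += c; count += 1
def escape_and_fold_ical_text_py_alt (text : String) (prefix_ : String) : String :=
  let escaped := PySem.Str.replace (PySem.Str.replace (PySem.Str.replace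
      (PySem.Str.replace text "\\" "\\\\") ";" "\\;") "," "\\,") "\n" "\\n"
  let full_line := prefix_.toList ++ escaped.toList
  let final := full_line.foldl
    (fun (st : List Char × Nat × Nat) c =>
      if st.2.1 = st.2.2 then (st.1 ++ ['\r', '\n', ' ', c], 1, 74)
      else (st.1 ++ [c], st.2.1 + 1, st.2.2))
    (([] : List Char), 0, 75)
  String.ofList final.1

-- ===== PRECONDITION & SPEC =====
def Spec_escape_and_fold_ical_text_py (text : String) (prefix_ : String) (out : String) : Prop := out = escape_and_fold_ical_text_py_alt text prefix_
instance (text : String) (prefix_ : String) (out : String) : Decidable (Spec_escape_and_fold_ical_text_py text prefix_ out) := by unfold Spec_escape_and_fold_ical_text_py; infer_instance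

-- ===== CLAIM (what is proved, stated in full; the proofs are below) =====
def Claim_equal_escape_and_fold_ical_text_py : Prop := ∀ (text : String) (prefix_ : String), Dom_escape_and_fold_ical_text_py text prefix_ → Spec_escape_and_fold_ical_text_py text prefix_ (escape_and_fold_ical_text_py text prefix_)

-- ===== LEMMAS AND PROOFS =====

-- Canonical form of the folded continuation tail: CRLF + space + 74 chars, repeated.
def pvRest74 : List Char → List Char
  | [] => []
  | c :: rest => '\r' :: '\n' :: ' ' :: c :: (rest.take 73 ++ pvRest74 (rest.drop 73))
termination_by cs => cs.length
decreasing_by simp only [List.length_drop, List.length_cons]; omega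

theorem pvRest74_nil : pvRest74 [] = [] := by rw [pvRest74.eq_def]

theorem pvRest74_cons (c : Char) (rest : List Char) :
    pvRest74 (c :: rest) = '\r' :: '\n' :: ' ' :: c :: (rest.take 73 ++ pvRest74 (rest.drop 73)) := by
  rw [pvRest74.eq_def]

-- Direct recursion computing what B's fold appends after `out`.
def pvEmitB : List Char → Nat → Nat → List Char
  | [], _, _ => []
  | c :: rest, count, limit =>
    if count = limit then '\r' :: '\n' :: ' ' :: c :: pvEmitB rest 1 74
    else c :: pvEmitB rest (count + 1) limit

theorem pvFoldl_emitB (cs : List Char) (out : List Char) (count limit : Nat) :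
    (cs.foldl
      (fun (st : List Char × Nat × Nat) c =>
        if st.2.1 = st.2.2 then (st.1 ++ ['\r', '\n', ' ', c], 1, 74)
        else (st.1 ++ [c], st.2.1 + 1, st.2.2))
      (out, count, limit)).1 = out ++ pvEmitB cs count limit := by
  induction cs generalizing out count limit with
  | nil => simp [pvEmitB]
  | cons c rest ih =>
    by_cases h : count = limit <;> simp [pvEmitB, h, List.foldl_cons, ih]

theorem pvEmitB_eq (cs : List Char) (count limit : Nat) (h : count ≤ limit) :
    pvEmitB cs count limit =
      cs.take (limit - count) ++ pvRest74 (cs.drop (limit - count)) := by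
  induction cs generalizing count limit with
  | nil => simp [pvEmitB, pvRest74_nil]
  | cons c rest ih =>
    by_cases hc : count = limit
    · subst hc
      rw [pvEmitB, if_pos rfl, ih 1 74 (by omega)]
      simp [pvRest74_cons]
    · have hlt : count < limit := lt_of_le_of_ne h hc
      rw [pvEmitB, if_neg hc, ih (count + 1) limit (by omega)]
      have hsub : limit - count = (limit - (count + 1)) + 1 := by omega
      rw [hsub]
      simp [List.take_succ_cons, List.drop_succ_cons]

theorem pvIntercalate_cons_cons (sep a b : List Char) (u : List (List Char)) :
    List.intercalate sep (a :: b :: u) = a ++ sep ++ List.intercalate sep (b :: u) := by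
  simp [List.intercalate, List.intersperse]

theorem pvIntercalate_append_singleton (sep x : List Char) (acc : List (List Char))
    (h : acc ≠ []) :
    List.intercalate sep (acc ++ [x]) = List.intercalate sep acc ++ sep ++ x := by
  induction acc with
  | nil => simp at h
  | cons a t ih =>
    cases t with
    | nil => simp [List.intercalate, List.intersperse]
    | cons b u =>
      have hih := ih (by simp)
      simp only [List.cons_append] at hih ⊢
      rw [pvIntercalate_cons_cons, hih, pvIntercalate_cons_cons]
      simp [List.append_assoc]

theorem pvFoldLoopA_join (remaining : List Char) (acc : List (List Char)) (h : acc ≠ []) :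
    List.intercalate ['\r', '\n'] (pvFoldLoopA remaining acc) =
      List.intercalate ['\r', '\n'] acc ++ pvRest74 remaining := by
  rw [pvFoldLoopA.eq_def]
  by_cases hr : remaining = []
  · rw [if_pos hr]; subst hr; rw [pvRest74_nil]; simp
  · rw [if_neg hr]
    have hrec := pvFoldLoopA_join (remaining.drop 74)
      (acc ++ [' ' :: remaining.take 74]) (by simp)
    rw [hrec, pvIntercalate_append_singleton _ _ _ h]
    obtain ⟨c, rest, rfl⟩ := List.exists_cons_of_ne_nil hr
    rw [pvRest74_cons]
    simp [List.drop_succ_cons, List.take_succ_cons, List.append_assoc]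
termination_by remaining.length
decreasing_by
  have : remaining.length ≠ 0 := by simpa [List.length_eq_zero_iff] using hr
  simp only [List.length_drop]; omega

-- ===== VERDICT (by name: the statement is the Claim_ definition above) =====
theorem escape_and_fold_ical_text_py_spec : Claim_equal_escape_and_fold_ical_text_py := by
  intro text prefix_ _
  unfold Spec_escape_and_fold_ical_text_py
  unfold escape_and_fold_ical_text_py escape_and_fold_ical_text_py_alt
  dsimp only
  set full := prefix_.toList ++ (PySem.Str.replace (PySem.Str.replace (PySem.Str.replace
      (PySem.Str.replace text "\\" "\\\\") ";" "\\;") "," "\\,") "\n" "\\n").toList with hfull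
  rw [pvFoldl_emitB, pvEmitB_eq full 0 75 (by omega)]
  by_cases h : full.length ≤ 75
  · rw [if_pos h]
    have h1 : full.drop 75 = [] := by simp [List.drop_eq_nil_iff]; omega
    have h2 : full.take 75 = full := List.take_of_length_le (by omega)
    simp [h1, h2, pvRest74_nil]
  · rw [if_neg h]
    rw [pvFoldLoopA_join _ _ (by simp)]
    simp [List.intercalate]
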